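-- pv_equiv track=rewrite | github.com/wjstempniak/Dependency-Structure-of-Coordination | data_processing/extracting_coordinations.py | is_between
-- ===== SOURCE A (Python) =====
-- def is_between(conjunct, token):
--     tokens_before = tokens_after = False
--     if token in conjunct:
--         return False
--     for t in conjunct:
--         if t['id'] < token['id']:
--             tokens_before = True
--         if t['id'] > token['id']:
--             tokens_after = True
--     return tokens_before and tokens_after
-- ===== SOURCE B (Python) =====
-- def is_between(conjunct, token):
--     if token in conjunct or not conjunct:
--         return False
--     ids = [t['id'] for t in conjunct]
--     return min(ids) < token['id'] < max(ids)
-- ===== Notes on version B (the rewrite author's own statement) =====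
-- stated objective: idiomatic
-- what changed: Replaces the two-flag scan with min/max aggregates over the id list and a single chained comparison (plus an empty-conjunct guard that replaces the flags' vacuous falsity).
import Mathlib
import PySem

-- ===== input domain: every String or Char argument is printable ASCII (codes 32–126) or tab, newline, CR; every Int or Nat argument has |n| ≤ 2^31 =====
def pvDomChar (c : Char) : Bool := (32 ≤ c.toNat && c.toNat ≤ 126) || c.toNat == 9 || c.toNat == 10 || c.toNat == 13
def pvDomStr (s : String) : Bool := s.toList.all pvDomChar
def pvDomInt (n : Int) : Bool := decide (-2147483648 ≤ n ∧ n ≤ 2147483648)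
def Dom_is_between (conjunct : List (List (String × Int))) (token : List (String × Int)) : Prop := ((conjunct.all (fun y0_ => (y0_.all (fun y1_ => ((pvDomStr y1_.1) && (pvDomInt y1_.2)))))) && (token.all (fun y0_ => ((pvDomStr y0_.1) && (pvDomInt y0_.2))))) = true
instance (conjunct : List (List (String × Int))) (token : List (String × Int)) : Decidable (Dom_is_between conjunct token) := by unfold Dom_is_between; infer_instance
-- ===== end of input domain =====

-- B replaces A's two-boolean-flag scan with min/max aggregates over the id list and one chained comparison (idiomatic; same O(n) cost).


-- ===== PORT A =====
-- shared helper: t['id'] (Pre_ guarantees the key is present wherever the Python evaluates it; getD 0 only fills the type)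
def pvGetId (d : List (String × Int)) : Int := ((PySem.Dict.mk d).get? "id").getD 0
-- shared helper: Python dict == — mapping equality, ignoring insertion order (exact on dicts, whose keys are unique)
def pvDictEq (d1 d2 : List (String × Int)) : Bool :=
  (d1.all (fun p => (PySem.Dict.mk d2).get? p.1 == (PySem.Dict.mk d1).get? p.1)) &&
  (d2.all (fun p => (PySem.Dict.mk d1).get? p.1 == (PySem.Dict.mk d2).get? p.1))

def is_between (conjunct : List (List (String × Int))) (token : List (String × Int)) : Bool :=
  -- tokens_before = tokens_after = False; if token in conjunct: return False
  if conjunct.any (fun t => pvDictEq t token) then false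
  else
    -- for t in conjunct: if t['id'] < token['id']: tokens_before = True; if t['id'] > token['id']: tokens_after = True
    let s := conjunct.foldl (fun (p : Bool × Bool) t =>
      ((if pvGetId t < pvGetId token then true else p.1),
       (if pvGetId t > pvGetId token then true else p.2))) (false, false)
    s.1 && s.2

-- ===== PORT B =====
def is_between_alt (conjunct : List (List (String × Int))) (token : List (String × Int)) : Bool :=
  -- if token in conjunct or not conjunct: return False
  if conjunct.any (fun t => pvDictEq t token) || conjunct.isEmpty then false
  else
    -- ids = [t['id'] for t in conjunct]; return min(ids) < token['id'] < max(ids)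
    let ids := conjunct.map pvGetId
    match PySem.List.min? ids (fun x => x), PySem.List.max? ids (fun x => x) with
    | some mn, some mx => decide (mn < pvGetId token) && decide (pvGetId token < mx)
    | _, _ => false

-- ===== PRECONDITION & SPEC =====
-- Pre_ excludes exactly the inputs where Python A raises KeyError: when the loop body runs
-- (conjunct nonempty and token not a member), every conjunct element and token must carry key 'id'.
def Pre_is_between (conjunct : List (List (String × Int))) (token : List (String × Int)) : Prop :=
  (conjunct ≠ [] ∧ conjunct.any (fun t => pvDictEq t token) = false) →
    ((PySem.Dict.mk token).contains "id" = true ∧ ∀ t ∈ conjunct, (PySem.Dict.mk t).contains "id" = true)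
instance (conjunct : List (List (String × Int))) (token : List (String × Int)) : Decidable (Pre_is_between conjunct token) := by unfold Pre_is_between; infer_instance
def pvWitness_is_between : (List (List (String × Int))) × (List (String × Int)) :=
  ([[("id", 1)], [("id", 3)]], [("id", 2)])
def Spec_is_between (conjunct : List (List (String × Int))) (token : List (String × Int)) (out : Bool) : Prop := out = is_between_alt conjunct token
instance (conjunct : List (List (String × Int))) (token : List (String × Int)) (out : Bool) : Decidable (Spec_is_between conjunct token out) := by unfold Spec_is_between; infer_instance

-- ===== CLAIM (what is proved, stated in full; the proofs are below) =====
def Claim_equal_is_between : Prop := ∀ (conjunct : List (List (String × Int))) (token : List (String × Int)), Dom_is_between conjunct token → Pre_is_between conjunct token → Spec_is_between conjunct token (is_between conjunct token)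

-- ===== LEMMAS AND PROOFS =====

-- A's pair-of-flags loop computed in closed form
theorem pv_foldl_flags {α : Type} (c1 c2 : α → Prop) [DecidablePred c1] [DecidablePred c2]
    (l : List α) (a b : Bool) :
    l.foldl (fun (p : Bool × Bool) t =>
      ((if c1 t then true else p.1), (if c2 t then true else p.2))) (a, b)
      = (a || l.any (fun t => decide (c1 t)), b || l.any (fun t => decide (c2 t))) := by
  induction l generalizing a b with
  | nil => simp
  | cons x xs ih =>
    simp only [List.foldl_cons, List.any_cons, ih]
    by_cases h1 : c1 x <;> by_cases h2 : c2 x <;> simp [h1, h2]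

-- 'some element is below v' iff 'the running minimum is below v'
theorem pv_any_lt_min (x v : Int) (t : List Int) :
    ((x :: t).any (fun y => decide (y < v))) = decide (t.foldl min x < v) := by
  rcases Bool.eq_false_or_eq_true ((x :: t).any (fun y => decide (y < v))) with h | h
  case inr =>
    rw [h]; symm
    have hnot : ∀ y ∈ (x :: t), ¬ y < v := by
      intro y hy
      have := List.any_eq_false.mp h y hy
      simpa using this
    simp only [decide_eq_false_iff_not, not_lt]
    rcases PySem.List.foldl_min_mem t x with hm | hm
    · rw [hm]; exact le_of_not_gt (hnot x List.mem_cons_self)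
    · exact le_of_not_gt (hnot _ (List.mem_cons_of_mem _ hm))
  case inl =>
    rw [h]; symm
    simp only [decide_eq_true_eq]
    obtain ⟨y, hy, hlt⟩ := List.any_eq_true.mp h
    rw [decide_eq_true_eq] at hlt
    rcases List.mem_cons.mp hy with rfl | hy
    · exact lt_of_le_of_lt (PySem.List.foldl_min_le t y).1 hlt
    · exact lt_of_le_of_lt ((PySem.List.foldl_min_le t x).2 y hy) hlt

-- 'some element is above v' iff 'the running maximum is above v'
theorem pv_any_gt_max (x v : Int) (t : List Int) :
    ((x :: t).any (fun y => decide (v < y))) = decide (v < t.foldl max x) := by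
  rcases Bool.eq_false_or_eq_true ((x :: t).any (fun y => decide (v < y))) with h | h
  case inr =>
    rw [h]; symm
    have hnot : ∀ y ∈ (x :: t), ¬ v < y := by
      intro y hy
      have := List.any_eq_false.mp h y hy
      simpa using this
    simp only [decide_eq_false_iff_not, not_lt]
    rcases PySem.List.foldl_max_mem t x with hm | hm
    · rw [hm]; exact le_of_not_gt (hnot x List.mem_cons_self)
    · exact le_of_not_gt (hnot _ (List.mem_cons_of_mem _ hm))
  case inl =>
    rw [h]; symm
    simp only [decide_eq_true_eq]
    obtain ⟨y, hy, hlt⟩ := List.any_eq_true.mp h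
    rw [decide_eq_true_eq] at hlt
    rcases List.mem_cons.mp hy with rfl | hy
    · exact lt_of_lt_of_le hlt (PySem.List.le_foldl_max t y).1
    · exact lt_of_lt_of_le hlt ((PySem.List.le_foldl_max t x).2 y hy)

theorem pv_ab_eq (conjunct : List (List (String × Int))) (token : List (String × Int)) :
    is_between conjunct token = is_between_alt conjunct token := by
  unfold is_between is_between_alt
  by_cases hm : conjunct.any (fun t => pvDictEq t token) = true
  · simp [hm]
  · rw [Bool.not_eq_true] at hm
    cases conjunct with
    | nil => simp
    | cons x xs =>
      rw [if_neg (by simp [hm]), if_neg (by simp [hm])]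
      simp only [List.map_cons]
      rw [PySem.List.min?_id_cons, PySem.List.max?_id_cons]
      rw [pv_foldl_flags (fun t => pvGetId t < pvGetId token) (fun t => pvGetId t > pvGetId token)]
      have h1 : ((x :: xs).any (fun t => decide (pvGetId t < pvGetId token)))
          = ((pvGetId x :: xs.map pvGetId).any (fun y => decide (y < pvGetId token))) := by
        simp [List.any_map, Function.comp_def]
      have h2 : ((x :: xs).any (fun t => decide (pvGetId t > pvGetId token)))
          = ((pvGetId x :: xs.map pvGetId).any (fun y => decide (pvGetId token < y))) := by
        simp [List.any_map, Function.comp_def, GT.gt]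
      simp only [h1, h2, pv_any_lt_min, pv_any_gt_max, Bool.false_or]

-- ===== VERDICT (by name: the statement is the Claim_ definition above) =====
theorem is_between_spec : Claim_equal_is_between := by
  intro conjunct token _ _
  unfold Spec_is_between
  exact pv_ab_eq conjunct token
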